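-- pv_equiv track=rewrite | github.com/BartekKrzepkowski/ONA-2020-2021 | projects/proj1/project1.py | create_centers
-- ===== SOURCE A (Python) =====
-- def create_centers(centers, k, step):
--     new_centers = []
--     for c in centers:
--         new_centers.append([c[0] - step, c[1] - step])
--         new_centers.append([c[0] - step, c[1] + step])
--         new_centers.append([c[0] + step, c[1] - step])
--         new_centers.append([c[0] + step, c[1] + step])
--     if k == 1:
--         return new_centers
--     else:
--         return create_centers(new_centers, k-1, step//2)
-- ===== SOURCE B (Python) =====
-- def _expand(centers, step):
--     return [pt
--             for c in centers
--             for pt in ([c[0] - step, c[1] - step],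
--                        [c[0] - step, c[1] + step],
--                        [c[0] + step, c[1] - step],
--                        [c[0] + step, c[1] + step])]
--
--
-- def create_centers(centers, k, step):
--     for _ in range(k - 1):
--         centers = _expand(centers, step)
--         step //= 2
--     return _expand(centers, step)
-- ===== Notes on version B (the rewrite author's own statement) =====
-- stated objective: simpler
-- what changed: Replaces A's tail recursion with explicit append loops by a bounded for-loop over range(k-1) that rebinds the state, with each expansion level built by a single flat comprehension helper.
import Mathlib
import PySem

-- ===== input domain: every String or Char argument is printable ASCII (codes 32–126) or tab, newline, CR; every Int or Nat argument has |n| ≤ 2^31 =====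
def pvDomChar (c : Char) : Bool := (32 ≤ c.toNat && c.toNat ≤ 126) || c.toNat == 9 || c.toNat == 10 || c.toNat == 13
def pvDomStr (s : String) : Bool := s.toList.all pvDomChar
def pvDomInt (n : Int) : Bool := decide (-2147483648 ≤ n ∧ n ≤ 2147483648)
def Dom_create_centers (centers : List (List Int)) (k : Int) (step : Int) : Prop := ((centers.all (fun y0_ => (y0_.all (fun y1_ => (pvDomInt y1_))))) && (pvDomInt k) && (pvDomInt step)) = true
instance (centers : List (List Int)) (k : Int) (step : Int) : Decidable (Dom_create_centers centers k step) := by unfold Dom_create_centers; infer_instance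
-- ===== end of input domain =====

-- B rewrites A's tail recursion as a bounded for-loop over range(k-1) with a flat
-- comprehension helper for one expansion level; return values agree on Pre_ (k ≥ 1,
-- every center has at least 2 coordinates).

-- ===== PORT A =====
-- c[i] under Pre_ is always in range; out-of-range inputs are excluded by Pre_.
def pvGetA (c : List Int) (i : Int) : Int := (PySem.List.pyGet? c i).getD 0

-- the recursion of A, on fuel k-1 (A diverges for k ≤ 0, which Pre_ excludes).
-- Python's O(1) list.append is modelled by consing onto a reversed accumulator and
-- reversing at the end: the same elements in the same order, without quadratic ++.
def createA_go (centers : List (List Int)) (k : Int) (step : Int) (fuel : Nat) : List (List Int) :=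
  let new_centers := (centers.foldl (fun acc c =>
    [pvGetA c 0 + step, pvGetA c 1 + step] ::
    [pvGetA c 0 + step, pvGetA c 1 - step] ::
    [pvGetA c 0 - step, pvGetA c 1 + step] ::
    [pvGetA c 0 - step, pvGetA c 1 - step] :: acc) []).reverse
  if k = 1 then new_centers
  else
    match fuel with
    | 0 => new_centers   -- unreachable under Pre_ (A does not return there)
    | f + 1 => createA_go new_centers (k - 1) (PySem.Int.floordiv step 2) f

def create_centers (centers : List (List Int)) (k : Int) (step : Int) : List (List Int) :=
  createA_go centers k step (k - 1).toNat

-- ===== PORT B =====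
-- the helper _expand of Source B: one level, as a flat comprehension
def pvExpandB (centers : List (List Int)) (step : Int) : List (List Int) :=
  centers.flatMap (fun c =>
    [[pvGetA c 0 - step, pvGetA c 1 - step],
     [pvGetA c 0 - step, pvGetA c 1 + step],
     [pvGetA c 0 + step, pvGetA c 1 - step],
     [pvGetA c 0 + step, pvGetA c 1 + step]])

def create_centers_alt (centers : List (List Int)) (k : Int) (step : Int) : List (List Int) :=
  let st := (List.range (k - 1).toNat).foldl
    (fun (st : List (List Int) × Int) _ => (pvExpandB st.1 st.2, PySem.Int.floordiv st.2 2))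
    (centers, step)
  pvExpandB st.1 st.2

-- ===== PRECONDITION & SPEC =====
-- Pre_ excludes k ≤ 0 (A recurses without returning: RecursionError / divergence) and
-- centers containing a list of length < 2 (A raises IndexError on c[1] or c[0]).
def Pre_create_centers (centers : List (List Int)) (k : Int) (step : Int) : Prop :=
  1 ≤ k ∧ ∀ c ∈ centers, 2 ≤ c.length

instance (centers : List (List Int)) (k : Int) (step : Int) : Decidable (Pre_create_centers centers k step) := by unfold Pre_create_centers; infer_instance

def pvWitness_create_centers : List (List Int) × Int × Int := ([[0, 0], [4, -4]], 2, 2)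

def Spec_create_centers (centers : List (List Int)) (k : Int) (step : Int) (out : List (List Int)) : Prop := out = create_centers_alt centers k step
instance (centers : List (List Int)) (k : Int) (step : Int) (out : List (List Int)) : Decidable (Spec_create_centers centers k step out) := by unfold Spec_create_centers; infer_instance

-- ===== CLAIM (what is proved, stated in full; the proofs are below) =====
def Claim_equal_create_centers : Prop := ∀ (centers : List (List Int)) (k : Int) (step : Int), Dom_create_centers centers k step → Pre_create_centers centers k step → Spec_create_centers centers k step (create_centers centers k step)

-- ===== LEMMAS AND PROOFS =====

-- A's append loop builds the same level as B's flat comprehension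
lemma expandA_eq (centers : List (List Int)) (step : Int) :
    (centers.foldl (fun acc c =>
      [pvGetA c 0 + step, pvGetA c 1 + step] ::
      [pvGetA c 0 + step, pvGetA c 1 - step] ::
      [pvGetA c 0 - step, pvGetA c 1 + step] ::
      [pvGetA c 0 - step, pvGetA c 1 - step] :: acc) []).reverse
    = pvExpandB centers step := by
  have h : ∀ (l : List (List Int)) (acc : List (List Int)),
      l.foldl (fun acc c =>
        [pvGetA c 0 + step, pvGetA c 1 + step] ::
        [pvGetA c 0 + step, pvGetA c 1 - step] ::
        [pvGetA c 0 - step, pvGetA c 1 + step] ::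
        [pvGetA c 0 - step, pvGetA c 1 - step] :: acc) acc
      = (pvExpandB l step).reverse ++ acc := by
    intro l
    induction l with
    | nil => intro acc; simp [pvExpandB]
    | cons c t ih =>
        intro acc
        simp only [List.foldl_cons, ih, pvExpandB, List.flatMap_cons]
        simp
  simp [h centers []]

-- the fuel recursion of A equals B's fold when the fuel is exactly k - 1
lemma go_eq_alt : ∀ (f : Nat) (centers : List (List Int)) (step : Int),
    createA_go centers ((f : Int) + 1) step f = create_centers_alt centers ((f : Int) + 1) step := by
  intro f
  induction f with
  | zero =>
      intro centers step
      simp only [createA_go, create_centers_alt]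
      norm_num [List.range_zero]
      exact expandA_eq centers step
  | succ f ih =>
      intro centers step
      push_cast
      have hk : ((f : Int) + 1 + 1) ≠ 1 := by omega
      have hfuel : ((f : Int) + 1 + 1 - 1).toNat = f + 1 := by omega
      have hfuel' : ((f : Int) + 1 - 1).toNat = f := by omega
      rw [createA_go]
      simp only [hk, if_false, expandA_eq]
      have h1 : ((f : Int) + 1 + 1 - 1) = (f : Int) + 1 := by ring
      have := ih (pvExpandB centers step) (PySem.Int.floordiv step 2)
      rw [h1, this]
      unfold create_centers_alt
      rw [hfuel, hfuel', List.range_succ_eq_map, List.foldl_cons, List.foldl_map]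

-- ===== VERDICT (by name: the statement is the Claim_ definition above) =====
theorem create_centers_spec : Claim_equal_create_centers := by
  intro centers k step _ hpre
  unfold Spec_create_centers create_centers
  obtain ⟨hk, _⟩ := hpre
  have hk' : k = ((k - 1).toNat : Int) + 1 := by omega
  rw [hk']
  have h2 : ((((k - 1).toNat : Int) + 1 - 1).toNat) = (k - 1).toNat := by omega
  rw [h2]
  exact go_eq_alt (k - 1).toNat centers step
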